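-- pv_equiv track=rewrite | github.com/cnichols1734/belvieu_digital | app/services/domain_service.py | _extract_tld
-- ===== SOURCE A (Python) =====
-- def _extract_tld(domain: str) -> str:
--     """Extract the TLD from a domain name.
--
--     Handles multi-part TLDs like co.uk, com.au, etc.
--     """
--     domain = domain.lower().strip().rstrip(".")
--
--     multi_part_tlds = [
--         "co.uk", "me.uk", "net.uk", "org.uk",
--         "co.nz", "net.nz", "org.nz", "geek.nz",
--         "com.mx", "org.mx",
--         "com.co", "net.co", "nom.co",
--         "com.ai", "net.ai", "off.ai", "org.ai",
--     ]
--     for tld in multi_part_tlds: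
--         if domain.endswith(f".{tld}"):
--             return tld
--
--     parts = domain.rsplit(".", 1)
--     if len(parts) == 2:
--         return parts[1]
--     return ""
-- ===== SOURCE B (Python) =====
-- # Two-level reverse trie keyed by the final label (country code), consulted after a full split
-- # into labels; structurally different from the linear endswith scan over whole compound TLDs.
-- _TLD_TRIE = {
--     "uk": {"co", "me", "net", "org"},
--     "nz": {"co", "net", "org", "geek"},
--     "mx": {"com", "org"},
--     "co": {"com", "net", "nom"},
--     "ai": {"com", "net", "off", "org"},
-- }
--
--
-- def _extract_tld(domain: str) -> str:
--     labels = domain.lower().strip().rstrip(".").split(".")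
--     rev = labels[::-1]
--     if len(rev) >= 3 and rev[1] in _TLD_TRIE.get(rev[0], ()):
--         return rev[1] + "." + rev[0]
--     if len(rev) >= 2:
--         return rev[0]
--     return ""
-- ===== Notes on version B (the rewrite author's own statement) =====
-- stated objective: alternative
-- what changed: Instead of scanning the flat 17-entry compound-TLD list with endswith on each iteration, B fully splits the normalized domain into labels once and consults a two-level reverse trie (a dict keyed by the final label whose values are sets of second-level labels), reading the answer and the single-label fallback off the reversed label list.
import Mathlib
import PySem

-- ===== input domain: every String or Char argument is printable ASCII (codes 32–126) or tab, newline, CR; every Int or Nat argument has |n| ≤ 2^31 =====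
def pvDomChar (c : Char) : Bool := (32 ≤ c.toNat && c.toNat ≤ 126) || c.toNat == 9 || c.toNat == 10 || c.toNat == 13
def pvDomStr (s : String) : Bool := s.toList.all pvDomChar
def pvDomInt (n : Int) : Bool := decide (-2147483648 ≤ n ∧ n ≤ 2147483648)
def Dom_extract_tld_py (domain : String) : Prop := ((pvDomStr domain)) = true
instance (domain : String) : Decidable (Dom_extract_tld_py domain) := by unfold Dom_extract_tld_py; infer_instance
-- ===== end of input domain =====

-- B replaces A's linear endswith scan over whole compound TLDs by a full split('.') into labels
-- followed by a two-level reverse-trie lookup (dict keyed by the final label, set of second-level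
-- labels as value); objective: alternative structure, not measured faster.


-- ===== shared primitive ports (Python built-ins not in PySem, ported by hand) =====

-- first occurrence of sep: some (before, after), none if absent (helper for rsplit)
def splitHead (sep : Char) : List Char → Option (List Char × List Char)
  | [] => none
  | c :: rest =>
      if c = sep then some ([], rest)
      else
        match splitHead sep rest with
        | none => none
        | some (a, b) => some (c :: a, b)

-- both Pythons' first line: domain.lower().strip().rstrip(".") — rstrip(".") ported by hand
-- (drop trailing '.'), exact
def pyNormalize (domain : String) : List Char :=
  ((PySem.Chars.strip (PySem.Chars.lower domain.toList)).reverse.dropWhile (· = '.')).reverse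

-- ===== PORT A =====

-- exact port of s.rsplit(".", 1): split at the LAST '.', working from the right
def rsplitDot1 (cs : List Char) : List (List Char) :=
  match splitHead '.' cs.reverse with
  | none => [cs]
  | some (a, b) => [b.reverse, a.reverse]

-- A's fallback lines: parts = d.rsplit(".", 1); parts[1] if len(parts) == 2 else ""
def tldFallback (d : List Char) : List Char :=
  match rsplitDot1 d with
  | [_, p1] => p1
  | _ => []

def multiTlds : List (List Char) :=
  ["co.uk".toList, "me.uk".toList, "net.uk".toList, "org.uk".toList,
   "co.nz".toList, "net.nz".toList, "org.nz".toList, "geek.nz".toList,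
   "com.mx".toList, "org.mx".toList,
   "com.co".toList, "net.co".toList, "nom.co".toList,
   "com.ai".toList, "net.ai".toList, "off.ai".toList, "org.ai".toList]

-- the for-loop: first tld with domain.endswith("." + tld)
def tldLoop (d : List Char) : List (List Char) → Option (List Char)
  | [] => none
  | t :: rest => if PySem.Chars.endswith d ('.' :: t) then some t else tldLoop d rest

def extract_tld_py (domain : String) : String :=
  let d := pyNormalize domain
  match tldLoop d multiTlds with
  | some t => String.ofList t
  | none => String.ofList (tldFallback d)

-- ===== PORT B =====

-- exact port of s.split("."): structural recursion over the characters
def splitDot : List Char → List (List Char)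
  | [] => [[]]
  | c :: rest =>
      let r := splitDot rest
      if c = '.' then [] :: r else (c :: r.headD []) :: r.tail

-- B's _TLD_TRIE: dict keyed by the final label, value = set of second-level labels
def tldTrie : PySem.Dict (List Char) (PySem.Set (List Char)) :=
  PySem.Dict.ofList
    [(['u','k'], PySem.Set.ofList [['c','o'], ['m','e'], ['n','e','t'], ['o','r','g']]),
     (['n','z'], PySem.Set.ofList [['c','o'], ['n','e','t'], ['o','r','g'], ['g','e','e','k']]),
     (['m','x'], PySem.Set.ofList [['c','o','m'], ['o','r','g']]),
     (['c','o'], PySem.Set.ofList [['c','o','m'], ['n','e','t'], ['n','o','m']]),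
     (['a','i'], PySem.Set.ofList [['c','o','m'], ['n','e','t'], ['o','f','f'], ['o','r','g']])]

def extract_tld_py_alt (domain : String) : String :=
  let labels := splitDot (pyNormalize domain)
  let rev := labels.reverse                -- labels[::-1]
  let y := rev.headD []                    -- rev[0]; guarded by the length tests, default unused
  let x := rev.tail.headD []               -- rev[1]; likewise guarded
  if 3 ≤ rev.length ∧ PySem.Set.contains (PySem.Dict.getD tldTrie y PySem.Set.empty) x then
    String.ofList (x ++ '.' :: y)
  else if 2 ≤ rev.length then String.ofList y
  else String.ofList []

-- ===== PRECONDITION & SPEC =====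
def Spec_extract_tld_py (domain : String) (out : String) : Prop := out = extract_tld_py_alt domain
instance (domain : String) (out : String) : Decidable (Spec_extract_tld_py domain out) := by unfold Spec_extract_tld_py; infer_instance

-- ===== CLAIM (what is proved, stated in full; the proofs are below) =====
def Claim_equal_extract_tld_py : Prop := ∀ (domain : String), Dom_extract_tld_py domain → Spec_extract_tld_py domain (extract_tld_py domain)

-- ===== LEMMAS AND PROOFS =====

theorem splitHead_some {sep : Char} : ∀ {l a b : List Char},
    splitHead sep l = some (a, b) → l = a ++ sep :: b ∧ sep ∉ a := by
  intro l
  induction l with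
  | nil => intro a b h; simp [splitHead] at h
  | cons c rest ih =>
      intro a b h
      by_cases hc : c = sep
      · simp [splitHead, hc] at h
        obtain ⟨ha, hb⟩ := h
        subst ha; subst hb; subst hc
        simp
      · simp only [splitHead, if_neg hc] at h
        cases hrec : splitHead sep rest with
        | none => rw [hrec] at h; simp at h
        | some p =>
            rw [hrec] at h
            obtain ⟨a', b'⟩ := p
            simp at h
            obtain ⟨ha, hb⟩ := h
            obtain ⟨hl, hn⟩ := ih hrec
            subst ha; subst hb
            constructor
            · simp [hl]
            · simp [hn, Ne.symm, hc]

theorem splitHead_eq_none {sep : Char} : ∀ {l : List Char}, splitHead sep l = none → sep ∉ l := by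
  intro l
  induction l with
  | nil => intro _; simp
  | cons c rest ih =>
      intro h
      by_cases hc : c = sep
      · simp [splitHead, hc] at h
      · simp only [splitHead, if_neg hc] at h
        cases hrec : splitHead sep rest with
        | none =>
            simp only [List.mem_cons, not_or]
            exact ⟨fun he => hc he.symm, ih hrec⟩
        | some p => rw [hrec] at h; obtain ⟨a, b⟩ := p; simp at h

theorem splitHead_append (sep : Char) (a b : List Char) (h : sep ∉ a) :
    splitHead sep (a ++ sep :: b) = some (a, b) := by
  induction a with
  | nil => simp [splitHead]
  | cons c rest ih =>
      simp only [List.mem_cons, not_or] at h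
      obtain ⟨hc, hrest⟩ := h
      simp [splitHead, Ne.symm hc, ih hrest]

theorem dotfree_cons_inj {x y x' y' : List Char} (hx : '.' ∉ x) (hx' : '.' ∉ x')
    (h : x ++ '.' :: y = x' ++ '.' :: y') : x = x' ∧ y = y' := by
  have h1 := splitHead_append '.' x y hx
  have h2 := splitHead_append '.' x' y' hx'
  rw [h] at h1
  rw [h2] at h1
  simp at h1
  exact ⟨h1.1.symm, h1.2.symm⟩

-- the candidate A's loop looks for, as a function of the last-two-dots decomposition
def rsplitDot2 (cs : List Char) : List (List Char) :=
  match splitHead '.' cs.reverse with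
  | none => [cs]
  | some (a, b) =>
      match splitHead '.' b with
      | none => [b.reverse, a.reverse]
      | some (c, e) => [e.reverse, c.reverse, a.reverse]

theorem rsplit2_eq_three {d p x y : List Char} :
    rsplitDot2 d = [p, x, y] ↔ d = p ++ '.' :: x ++ '.' :: y ∧ '.' ∉ x ∧ '.' ∉ y := by
  constructor
  · intro h
    unfold rsplitDot2 at h
    cases h1 : splitHead '.' d.reverse with
    | none => rw [h1] at h; simp at h
    | some q =>
        obtain ⟨a, b⟩ := q
        rw [h1] at h
        dsimp only at h
        cases h2 : splitHead '.' b with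
        | none => rw [h2] at h; simp at h
        | some r =>
            obtain ⟨c, e⟩ := r
            rw [h2] at h
            simp at h
            obtain ⟨hp, hx, hy⟩ := h
            obtain ⟨hb1, hn1⟩ := splitHead_some h1
            obtain ⟨hb2, hn2⟩ := splitHead_some h2
            subst hp; subst hx; subst hy
            have hd : d = d.reverse.reverse := by simp
            rw [hb2] at hb1
            refine ⟨?_, ?_, ?_⟩
            · rw [hd, hb1]; simp
            · simpa using hn2
            · simpa using hn1
  · rintro ⟨hd, hx, hy⟩
    have hrev : d.reverse = y.reverse ++ '.' :: (x.reverse ++ '.' :: p.reverse) := by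
      rw [hd]; simp
    have hy' : '.' ∉ y.reverse := by simpa using hy
    have hx' : '.' ∉ x.reverse := by simpa using hx
    unfold rsplitDot2
    rw [hrev, splitHead_append '.' _ _ hy']
    dsimp only
    rw [splitHead_append '.' _ _ hx']
    simp

theorem endswith_rsplit2 (d tx ty : List Char) (hx : '.' ∉ tx) (hy : '.' ∉ ty) :
    PySem.Chars.endswith d ('.' :: (tx ++ '.' :: ty)) = true ↔ ∃ p, rsplitDot2 d = [p, tx, ty] := by
  rw [PySem.Chars.endswith_iff]
  constructor
  · rintro ⟨p, hp⟩
    refine ⟨p, rsplit2_eq_three.mpr ⟨?_, hx, hy⟩⟩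
    rw [← hp]; simp
  · rintro ⟨p, hp⟩
    obtain ⟨hd, _, _⟩ := rsplit2_eq_three.mp hp
    exact ⟨p, by rw [hd]; simp⟩

-- the candidate implied by the last two labels
def tldKey? (d : List Char) : Option (List Char) :=
  match rsplitDot2 d with
  | [_, x, y] => some (x ++ '.' :: y)
  | _ => none

theorem cond_iff_key? (d t tx ty : List Char) (ht : t = tx ++ '.' :: ty)
    (hx : '.' ∉ tx) (hy : '.' ∉ ty) :
    PySem.Chars.endswith d ('.' :: t) = true ↔ tldKey? d = some t := by
  subst ht
  rw [endswith_rsplit2 d tx ty hx hy]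
  unfold tldKey?
  rcases hs : rsplitDot2 d with _ | ⟨p0, _ | ⟨p1, _ | ⟨p2, _ | rest⟩⟩⟩ <;> simp_all
  · obtain ⟨hd, hx2, hy2⟩ := rsplit2_eq_three.mp hs
    constructor
    · rintro ⟨h1, h2⟩; rw [h1, h2]
    · intro h
      exact dotfree_cons_inj hx2 hx h

theorem tldLoop_eq_key? (d : List Char) (L : List (List Char))
    (h : ∀ t ∈ L, (PySem.Chars.endswith d ('.' :: t) = true ↔ tldKey? d = some t)) :
    tldLoop d L = (tldKey? d).bind (fun k => if k ∈ L then some k else none) := by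
  induction L with
  | nil => cases tldKey? d <;> simp [tldLoop]
  | cons t rest ih =>
      have ht := h t (by simp)
      have hrest : ∀ t' ∈ rest, (PySem.Chars.endswith d ('.' :: t') = true ↔ tldKey? d = some t') :=
        fun t' h' => h t' (by simp [h'])
      by_cases hc : PySem.Chars.endswith d ('.' :: t) = true
      · have hk := ht.mp hc
        simp [tldLoop, hc, hk]
      · have hk : tldKey? d ≠ some t := fun hk => hc (ht.mpr hk)
        rw [tldLoop, if_neg hc, ih hrest]
        cases hkd : tldKey? d with
        | none => simp
        | some k =>
            have hne : k ≠ t := by rintro rfl; exact hk hkd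
            simp [hne]

theorem conds_all (d : List Char) :
    ∀ t ∈ multiTlds, (PySem.Chars.endswith d ('.' :: t) = true ↔ tldKey? d = some t) := by
  intro t ht
  simp [multiTlds] at ht
  rcases ht with rfl | rfl | rfl | rfl | rfl | rfl | rfl | rfl | rfl | rfl | rfl | rfl | rfl | rfl | rfl | rfl | rfl
  · exact cond_iff_key? d _ ['c','o'] ['u','k'] (by decide) (by decide) (by decide)
  · exact cond_iff_key? d _ ['m','e'] ['u','k'] (by decide) (by decide) (by decide)
  · exact cond_iff_key? d _ ['n','e','t'] ['u','k'] (by decide) (by decide) (by decide)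
  · exact cond_iff_key? d _ ['o','r','g'] ['u','k'] (by decide) (by decide) (by decide)
  · exact cond_iff_key? d _ ['c','o'] ['n','z'] (by decide) (by decide) (by decide)
  · exact cond_iff_key? d _ ['n','e','t'] ['n','z'] (by decide) (by decide) (by decide)
  · exact cond_iff_key? d _ ['o','r','g'] ['n','z'] (by decide) (by decide) (by decide)
  · exact cond_iff_key? d _ ['g','e','e','k'] ['n','z'] (by decide) (by decide) (by decide)
  · exact cond_iff_key? d _ ['c','o','m'] ['m','x'] (by decide) (by decide) (by decide)
  · exact cond_iff_key? d _ ['o','r','g'] ['m','x'] (by decide) (by decide) (by decide)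
  · exact cond_iff_key? d _ ['c','o','m'] ['c','o'] (by decide) (by decide) (by decide)
  · exact cond_iff_key? d _ ['n','e','t'] ['c','o'] (by decide) (by decide) (by decide)
  · exact cond_iff_key? d _ ['n','o','m'] ['c','o'] (by decide) (by decide) (by decide)
  · exact cond_iff_key? d _ ['c','o','m'] ['a','i'] (by decide) (by decide) (by decide)
  · exact cond_iff_key? d _ ['n','e','t'] ['a','i'] (by decide) (by decide) (by decide)
  · exact cond_iff_key? d _ ['o','f','f'] ['a','i'] (by decide) (by decide) (by decide)
  · exact cond_iff_key? d _ ['o','r','g'] ['a','i'] (by decide) (by decide) (by decide)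

-- ---- splitDot lemmas ----

theorem splitDot_ne_nil (cs : List Char) : splitDot cs ≠ [] := by
  cases cs with
  | nil => simp [splitDot]
  | cons c rest => simp only [splitDot]; split <;> simp

theorem splitDot_nodot : ∀ {y : List Char}, '.' ∉ y → splitDot y = [y] := by
  intro y
  induction y with
  | nil => intro _; rfl
  | cons c ys ih =>
      intro h
      simp only [List.mem_cons, not_or] at h
      obtain ⟨hc, hys⟩ := h
      simp [splitDot, Ne.symm, hc, ih hys]

theorem splitDot_append (p y : List Char) (hy : '.' ∉ y) :
    splitDot (p ++ '.' :: y) = splitDot p ++ [y] := by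
  induction p with
  | nil => simp [splitDot, splitDot_nodot hy]
  | cons c p' ih =>
      by_cases hc : c = '.'
      · subst hc; simp [splitDot, ih]
      · rcases hq : splitDot p' with _ | ⟨q, qs⟩
        · exact absurd hq (splitDot_ne_nil p')
        · simp [splitDot, hc, ih, hq]

-- ---- trie characterization ----

def tldPairs : List (List Char × List Char) :=
  [(['c','o'],['u','k']), (['m','e'],['u','k']), (['n','e','t'],['u','k']), (['o','r','g'],['u','k']),
   (['c','o'],['n','z']), (['n','e','t'],['n','z']), (['o','r','g'],['n','z']), (['g','e','e','k'],['n','z']),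
   (['c','o','m'],['m','x']), (['o','r','g'],['m','x']),
   (['c','o','m'],['c','o']), (['n','e','t'],['c','o']), (['n','o','m'],['c','o']),
   (['c','o','m'],['a','i']), (['n','e','t'],['a','i']), (['o','f','f'],['a','i']), (['o','r','g'],['a','i'])]

theorem multiTlds_eq_map : multiTlds = tldPairs.map (fun p => p.1 ++ '.' :: p.2) := by decide

theorem pairs_fst_dotfree : ∀ p ∈ tldPairs, '.' ∉ p.1 := by decide

theorem mem_multi {x y : List Char} (hx : '.' ∉ x) :
    (x ++ '.' :: y) ∈ multiTlds ↔ (x, y) ∈ tldPairs := by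
  rw [multiTlds_eq_map, List.mem_map]
  constructor
  · rintro ⟨p, hp, he⟩
    obtain ⟨h1, h2⟩ := dotfree_cons_inj (pairs_fst_dotfree p hp) hx he
    have : p = (x, y) := by
      cases p; simp_all
    rw [← this]; exact hp
  · intro h; exact ⟨(x, y), h, rfl⟩

theorem pairs_snd : ∀ p ∈ tldPairs,
    p.2 = ['u','k'] ∨ p.2 = ['n','z'] ∨ p.2 = ['m','x'] ∨ p.2 = ['c','o'] ∨ p.2 = ['a','i'] := by decide

theorem trie_iff (x y : List Char) (hx : '.' ∉ x) :
    PySem.Set.contains (PySem.Dict.getD tldTrie y PySem.Set.empty) x = true ↔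
      (x ++ '.' :: y) ∈ multiTlds := by
  rw [mem_multi hx]
  by_cases h1 : y = ['u','k']
  · subst h1
    rw [show PySem.Dict.getD tldTrie ['u','k'] PySem.Set.empty =
          PySem.Set.ofList [['c','o'], ['m','e'], ['n','e','t'], ['o','r','g']] from rfl]
    rw [PySem.Set.contains_iff, PySem.Set.mem_ofList]
    simp [tldPairs]
  · by_cases h2 : y = ['n','z']
    · subst h2
      rw [show PySem.Dict.getD tldTrie ['n','z'] PySem.Set.empty =
            PySem.Set.ofList [['c','o'], ['n','e','t'], ['o','r','g'], ['g','e','e','k']] from rfl]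
      rw [PySem.Set.contains_iff, PySem.Set.mem_ofList]
      simp [tldPairs]
    · by_cases h3 : y = ['m','x']
      · subst h3
        rw [show PySem.Dict.getD tldTrie ['m','x'] PySem.Set.empty =
              PySem.Set.ofList [['c','o','m'], ['o','r','g']] from rfl]
        rw [PySem.Set.contains_iff, PySem.Set.mem_ofList]
        simp [tldPairs]
      · by_cases h4 : y = ['c','o']
        · subst h4
          rw [show PySem.Dict.getD tldTrie ['c','o'] PySem.Set.empty =
                PySem.Set.ofList [['c','o','m'], ['n','e','t'], ['n','o','m']] from rfl]
          rw [PySem.Set.contains_iff, PySem.Set.mem_ofList]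
          simp [tldPairs]
        · by_cases h5 : y = ['a','i']
          · subst h5
            rw [show PySem.Dict.getD tldTrie ['a','i'] PySem.Set.empty =
                  PySem.Set.ofList [['c','o','m'], ['n','e','t'], ['o','f','f'], ['o','r','g']] from rfl]
            rw [PySem.Set.contains_iff, PySem.Set.mem_ofList]
            simp [tldPairs]
          · have hg : PySem.Dict.getD tldTrie y PySem.Set.empty = PySem.Set.empty := by
              rw [show tldTrie = PySem.Dict.mk
                    [(['u','k'], PySem.Set.ofList [['c','o'], ['m','e'], ['n','e','t'], ['o','r','g']]),
                     (['n','z'], PySem.Set.ofList [['c','o'], ['n','e','t'], ['o','r','g'], ['g','e','e','k']]),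
                     (['m','x'], PySem.Set.ofList [['c','o','m'], ['o','r','g']]),
                     (['c','o'], PySem.Set.ofList [['c','o','m'], ['n','e','t'], ['n','o','m']]),
                     (['a','i'], PySem.Set.ofList [['c','o','m'], ['n','e','t'], ['o','f','f'], ['o','r','g']])]
                  from rfl]
              simp [PySem.Dict.getD_eq_get?_getD, beq_iff_eq, PySem.Dict.get?, Ne.symm h1, Ne.symm h2, Ne.symm h3, Ne.symm h4, Ne.symm h5]
            rw [hg]
            simp only [PySem.Set.empty]
            constructor
            · intro h; simp [PySem.Set.contains] at h
            · intro h
              rcases pairs_snd _ h with h' | h' | h' | h' | h' <;> simp_all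

-- ---- the core equality ----

theorem core_eq (d : List Char) :
    (match tldLoop d multiTlds with
     | some t => String.ofList t
     | none => String.ofList (tldFallback d)) =
    (let labels := splitDot d
     let rev := labels.reverse
     let y := rev.headD []
     let x := rev.tail.headD []
     if 3 ≤ rev.length ∧ PySem.Set.contains (PySem.Dict.getD tldTrie y PySem.Set.empty) x then
       String.ofList (x ++ '.' :: y)
     else if 2 ≤ rev.length then String.ofList y
     else String.ofList []) := by
  rw [tldLoop_eq_key? d multiTlds (conds_all d)]
  cases h1 : splitHead '.' d.reverse with
  | none =>
      have hnd : '.' ∉ d := by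
        have := splitHead_eq_none h1; simpa using this
      have hr2 : rsplitDot2 d = [d] := by unfold rsplitDot2; rw [h1]
      have hr1 : rsplitDot1 d = [d] := by unfold rsplitDot1; rw [h1]
      have hs : splitDot d = [d] := splitDot_nodot hnd
      simp [tldKey?, hr2, tldFallback, hr1, hs]
  | some ab =>
      obtain ⟨a, b⟩ := ab
      obtain ⟨hd_eq, hna⟩ := splitHead_some h1
      have hd : d = b.reverse ++ '.' :: a.reverse := by
        have : d = d.reverse.reverse := by simp
        rw [this, hd_eq]; simp
      have hy : '.' ∉ a.reverse := by simpa using hna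
      have hr1 : rsplitDot1 d = [b.reverse, a.reverse] := by unfold rsplitDot1; rw [h1]
      cases h2 : splitHead '.' b with
      | none =>
          have hnb : '.' ∉ b.reverse := by
            have := splitHead_eq_none h2; simpa using this
          have hr2 : rsplitDot2 d = [b.reverse, a.reverse] := by unfold rsplitDot2; rw [h1]; dsimp only; rw [h2]
          have hs : splitDot d = [b.reverse, a.reverse] := by
            rw [hd, splitDot_append _ _ hy, splitDot_nodot hnb]; rfl
          simp [tldKey?, hr2, tldFallback, hr1, hs]
      | some ce =>
          obtain ⟨c, e⟩ := ce
          obtain ⟨hb_eq, hnc⟩ := splitHead_some h2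
          have hx : '.' ∉ c.reverse := by simpa using hnc
          have hr2 : rsplitDot2 d = [e.reverse, c.reverse, a.reverse] := by
            unfold rsplitDot2; rw [h1]; dsimp only; rw [h2]
          have hd2 : d = (e.reverse ++ '.' :: c.reverse) ++ '.' :: a.reverse := by
            rw [hd, hb_eq]; simp
          have hs : splitDot d = (splitDot e.reverse ++ [c.reverse]) ++ [a.reverse] := by
            rw [hd2, splitDot_append _ _ hy, splitDot_append _ _ hx]
          have hne := splitDot_ne_nil e.reverse
          have hlen : 1 ≤ (splitDot e.reverse).length := List.length_pos_of_ne_nil hne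
          by_cases hmem : c.reverse ∈ PySem.Dict.getD tldTrie a.reverse ([] : List (List Char))
          · have hm : (c.reverse ++ '.' :: a.reverse) ∈ multiTlds :=
              (trie_iff _ _ hx).mp (by simp only [PySem.Set.contains_iff]; exact hmem)
            simp only [tldKey?, hr2, hs]
            simp [hm, hmem, PySem.Set.empty, hlen]
          · have hm : (c.reverse ++ '.' :: a.reverse) ∉ multiTlds := fun h => by
              have hct := (trie_iff _ _ hx).mpr h
              simp only [PySem.Set.contains_iff] at hct
              exact hmem hct
            simp only [tldKey?, hr2, hs]
            simp [hm, hmem, PySem.Set.empty, tldFallback, hr1]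

-- ===== VERDICT (by name: the statement is the Claim_ definition above) =====
theorem extract_tld_py_spec : Claim_equal_extract_tld_py := by
  intro domain _
  unfold Spec_extract_tld_py extract_tld_py extract_tld_py_alt
  exact core_eq (pyNormalize domain)
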